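-- pv_equiv track=rewrite | github.com/jonah-saltzman/car-routing | routing-alg-fast.py | shortest_route
-- ===== SOURCE A (Python) =====
-- def route_length(route):
--     distance = 0
--     for i in range(len(route) - 1):
--         distance = distance + calc_distance(route[i], route[i + 1])
--     return distance
--
-- def shortest_route(start, routes, max):
--     scores = []
--     for route in routes:
--         route.insert(0, start)
--         dist = route_length(route)
--         scores.append({'route': route, 'distance': dist})
--     shortest_distance = max
--     best_route = None
--     for route in scores:
--         if route['distance'] < shortest_distance:
--             shortest_distance = route['distance']
--             best_route = route['route']
--     return best_route
--
-- def calc_distance(a, b):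
--     dist_x = abs(a[0] - b[0])
--     dist_y = abs(a[1] - b[1])
--     return dist_x + dist_y
-- ===== SOURCE B (Python) =====
-- def _manhattan_len(route):
--     return sum(abs(a[0] - b[0]) + abs(a[1] - b[1]) for a, b in zip(route, route[1:]))
--
-- def shortest_route(start, routes, max):
--     # NOTE: unlike A, this does not mutate the caller's route lists; return value is identical.
--     candidates = sorted(([start] + route for route in routes), key=_manhattan_len)
--     if candidates and _manhattan_len(candidates[0]) < max:
--         return candidates[0]
--     return None
-- ===== Notes on version B (the rewrite author's own statement) =====
-- stated objective: alternative
-- what changed: B replaces A's index-loop distance and running-minimum scan by a zip-based Manhattan length used as the key of a stable sort, taking the head of the sorted candidate list if its length is strictly below max; B does not mutate the input route lists (A inserts start in place), return values are identical.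
import Mathlib
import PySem

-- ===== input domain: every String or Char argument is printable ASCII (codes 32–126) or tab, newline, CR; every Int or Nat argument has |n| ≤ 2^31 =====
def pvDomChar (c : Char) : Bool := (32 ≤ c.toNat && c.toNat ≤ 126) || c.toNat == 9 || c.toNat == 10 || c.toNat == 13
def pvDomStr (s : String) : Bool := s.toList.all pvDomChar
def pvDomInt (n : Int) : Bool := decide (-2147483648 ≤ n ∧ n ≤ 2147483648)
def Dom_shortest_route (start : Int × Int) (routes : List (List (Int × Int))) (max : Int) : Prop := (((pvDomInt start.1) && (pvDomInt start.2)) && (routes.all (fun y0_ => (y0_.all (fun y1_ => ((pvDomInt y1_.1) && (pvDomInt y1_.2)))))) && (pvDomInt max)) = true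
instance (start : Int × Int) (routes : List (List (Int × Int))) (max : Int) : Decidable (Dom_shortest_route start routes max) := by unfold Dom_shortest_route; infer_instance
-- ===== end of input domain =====

-- B finds the best route by a stable sort on the Manhattan length instead of A's running-minimum scan;
-- A mutates each route in place (insert(0, start)), B does not — the equivalence proved is about the return value.

-- ===== PORT A =====
def calc_distance (a b : Int × Int) : Int := (a.1 - b.1).natAbs + (a.2 - b.2).natAbs

-- 'for i in range(len(route)-1): distance += calc_distance(route[i], route[i+1])'; indices are always in
-- range, so route[i] is ported with pyGetD (the default is never used).
def route_length (route : List (Int × Int)) : Int :=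
  (PySem.List.pyRange 0 ((route.length : Int) - 1) 1).foldl
    (fun d i => d + calc_distance (PySem.List.pyGetD route i (0, 0)) (PySem.List.pyGetD route (i + 1) (0, 0))) 0

def shortest_route (start : Int × Int) (routes : List (List (Int × Int))) (max : Int) : Option (List (Int × Int)) :=
  -- scores: list of {'route': route, 'distance': dist} dicts, modelled as (route, distance) pairs
  let scores := routes.foldl (fun acc route =>
    let route' := start :: route        -- route.insert(0, start)
    acc ++ [(route', route_length route')]) []
  let fin := scores.foldl (fun s sc => if sc.2 < s.1 then (sc.2, some sc.1) else s) (max, (none : Option (List (Int × Int))))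
  fin.2

-- ===== PORT B =====
-- sum(... for a, b in zip(route, route[1:])); route[1:] is route.drop 1 (exact for a plain list slice)
def manhattan_len (route : List (Int × Int)) : Int :=
  (route.zip (route.drop 1)).foldl (fun d ab => d + ((ab.1.1 - ab.2.1).natAbs + (ab.1.2 - ab.2.2).natAbs : Int)) 0

def shortest_route_alt (start : Int × Int) (routes : List (List (Int × Int))) (max : Int) : Option (List (Int × Int)) :=
  let candidates := PySem.List.sorted (routes.map (fun route => start :: route)) manhattan_len false
  -- 'if candidates and _manhattan_len(candidates[0]) < max: return candidates[0]; return None'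
  candidates.head?.bind (fun c => if manhattan_len c < max then some c else none)

-- ===== PRECONDITION & SPEC =====
def Spec_shortest_route (start : Int × Int) (routes : List (List (Int × Int))) (max : Int) (out : Option (List (Int × Int))) : Prop := out = shortest_route_alt start routes max
instance (start : Int × Int) (routes : List (List (Int × Int))) (max : Int) (out : Option (List (Int × Int))) : Decidable (Spec_shortest_route start routes max out) := by unfold Spec_shortest_route; infer_instance

-- ===== CLAIM (what is proved, stated in full; the proofs are below) =====
def Claim_equal_shortest_route : Prop := ∀ (start : Int × Int) (routes : List (List (Int × Int))) (max : Int), Dom_shortest_route start routes max → Spec_shortest_route start routes max (shortest_route start routes max)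

-- ===== LEMMAS AND PROOFS =====

-- the per-index distance terms of A's loop are exactly the per-pair terms of B's zip
theorem pyGetD_cons_succ (a : Int × Int) (s : List (Int × Int)) (k : Nat) (d : Int × Int) :
    PySem.List.pyGetD (a :: s) ((k : Int) + 1) d = PySem.List.pyGetD s (k : Int) d := by
  have h1 : ((k : Int) + 1) = ((k + 1 : Nat) : Int) := by push_cast; ring
  rw [h1, PySem.List.pyGetD_natCast, PySem.List.pyGetD_natCast]
  simp

theorem range_map_eq_zip_map (r : List (Int × Int)) :
    (PySem.List.pyRange 0 ((r.length : Int) - 1) 1).map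
        (fun i => calc_distance (PySem.List.pyGetD r i (0, 0)) (PySem.List.pyGetD r (i + 1) (0, 0)))
      = (r.zip (r.drop 1)).map (fun ab => ((ab.1.1 - ab.2.1).natAbs + (ab.1.2 - ab.2.2).natAbs : Int)) := by
  induction r with
  | nil => simp [PySem.List.pyRange_one_eq_nil]
  | cons a t ih =>
    cases t with
    | nil => simp [PySem.List.pyRange_one_eq_nil]
    | cons b t' =>
      have hlen : ((a :: b :: t').length : Int) - 1 = (t'.length : Int) + 1 := by
        simp only [List.length_cons]; push_cast; ring
      have hlen' : ((b :: t').length : Int) - 1 = (t'.length : Int) := by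
        simp only [List.length_cons]; push_cast; ring
      rw [hlen, PySem.List.pyRange_one_cons (by positivity), List.map_cons]
      rw [hlen'] at ih
      rw [PySem.List.pyRange_one] at ih ⊢
      have ht1 : ((t'.length : Int) + 1 - (0 + 1)).toNat = t'.length := by omega
      have ht0 : ((t'.length : Int) - 0).toNat = t'.length := by omega
      rw [ht1]
      rw [ht0] at ih
      have hzip : (a :: b :: t').zip (List.drop 1 (a :: b :: t'))
          = (a, b) :: ((b :: t').zip (List.drop 1 (b :: t'))) := by simp
      rw [hzip, List.map_cons]
      congr 1
      · simp [calc_distance, PySem.List.pyGetD]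
      · rw [← ih, List.map_map, List.map_map]
        refine List.map_congr_left (fun k _ => ?_)
        simp only [Function.comp_apply, zero_add]
        rw [show ((1 : Int) + (k : Int)) = ((k : Int) + 1) by ring]
        rw [pyGetD_cons_succ]
        rw [show ((k : Int) + 1 + 1) = ((k + 1 : Nat) : Int) + 1 by push_cast; ring]
        rw [pyGetD_cons_succ]
        push_cast
        rfl

-- A's index-loop distance equals B's zip-based Manhattan length.
theorem route_length_eq (route : List (Int × Int)) : route_length route = manhattan_len route := by
  unfold route_length manhattan_len
  rw [PySem.List.foldl_add, PySem.List.foldl_add]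
  rw [range_map_eq_zip_map]

-- the invariant tying A's running-minimum state to B's stable insertion sort of the processed prefix
def ScanInv {α : Type} (k : α → Int) (m0 : Int) (s : Int × Option α) (acc : List α) : Prop :=
  (acc = [] ∧ s = (m0, none)) ∨
    ∃ p t, acc = p :: t ∧ (∀ q ∈ t, k p ≤ k q) ∧ s = (if k p < m0 then (k p, some p) else (m0, none))

theorem scanInv_step {α : Type} (k : α → Int) (m0 : Int) (x : α) (s : Int × Option α) (acc : List α)
    (h : ScanInv k m0 s acc) :
    ScanInv k m0 (if k x < s.1 then (k x, some x) else s)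
      (PySem.List.insertBy (fun a b => decide (k a < k b)) x acc) := by
  rcases h with ⟨hacc, hs⟩ | ⟨p, t, hacc, hpt, hs⟩
  · subst hacc; subst hs
    exact Or.inr ⟨x, [], by simp [PySem.List.insertBy], by simp, by simp⟩
  · subst hacc; subst hs
    by_cases hxp : k x < k p
    · refine Or.inr ⟨x, p :: t, by simp [PySem.List.insertBy, hxp], ?_, ?_⟩
      · intro q hq
        rcases List.mem_cons.1 hq with rfl | hq
        · exact hxp.le
        · exact hxp.le.trans (hpt q hq)
      · by_cases hpm : k p < m0
        · rw [if_pos hpm]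
          have hxm : k x < m0 := hxp.trans hpm
          simp [hxp, hxm]
        · rw [if_neg hpm]
    · refine Or.inr ⟨p, PySem.List.insertBy (fun a b => decide (k a < k b)) x t,
        by simp [PySem.List.insertBy, hxp], ?_, ?_⟩
      · intro q hq
        rcases (PySem.List.mem_insertBy _ _ _ _).1 hq with rfl | hq
        · exact not_lt.1 hxp
        · exact hpt q hq
      · have hcond : ¬ k x < (if k p < m0 then ((k p, some p) : Int × Option α) else (m0, none)).1 := by
          by_cases hpm : k p < m0 <;> simp [hpm] <;> omega
        rw [if_neg hcond]

theorem scanInv_foldl {α : Type} (k : α → Int) (m0 : Int) (l : List α) :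
    ∀ (s : Int × Option α) (acc : List α), ScanInv k m0 s acc →
      ScanInv k m0 (l.foldl (fun s c => if k c < s.1 then (k c, some c) else s) s)
        (l.foldl (fun a x => PySem.List.insertBy (fun a b => decide (k a < k b)) x a) acc) := by
  induction l with
  | nil => intro s acc h; simpa using h
  | cons x l ih =>
    intro s acc h
    simpa using ih _ _ (scanInv_step k m0 x s acc h)

-- the running-minimum scan equals head-of-stable-sort
theorem scan_eq_sorted_head {α : Type} (k : α → Int) (m0 : Int) (l : List α) :
    (l.foldl (fun s c => if k c < s.1 then (k c, some c) else s) (m0, (none : Option α))).2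
      = (PySem.List.sorted l k false).head?.bind (fun c => if k c < m0 then some c else none) := by
  have h := scanInv_foldl k m0 l (m0, none) [] (Or.inl ⟨rfl, rfl⟩)
  rw [PySem.List.sorted_eq_foldl_insertBy]
  rcases h with ⟨hacc, hs⟩ | ⟨p, t, hacc, _, hs⟩
  · rw [hacc, hs]
    rfl
  · rw [hacc, hs]
    by_cases hpm : k p < m0 <;> simp [hpm]

-- ===== VERDICT (by name: the statement is the Claim_ definition above) =====
theorem shortest_route_spec : Claim_equal_shortest_route := by
  intro start routes max _
  show shortest_route start routes max = shortest_route_alt start routes max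
  unfold shortest_route shortest_route_alt
  simp only [PySem.List.foldl_append_singleton_eq_map, List.nil_append, List.foldl_map]
  simp only [route_length_eq]
  have h := scan_eq_sorted_head manhattan_len max (routes.map (fun route => start :: route))
  rw [List.foldl_map] at h
  exact h
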